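-- pv_equiv track=rewrite | github.com/afilipch/afp | cgps/at_steps.py | count_at_steps
-- ===== SOURCE A (Python) =====
-- def count_at_steps(sequence):
--     prev = ''
--     count = 0;
--     for s in sequence:
--         if(s == 'A' and prev == 'T'):
--             count += 1;
--             prev = '';
--
--         elif(s == 'T' and prev == 'A'):
--             count += 1;
--             prev = '';
--
--         else:
--             prev = s;
--     return count;
-- ===== SOURCE B (Python) =====
-- def count_at_steps(sequence):
--     # Stage 1: lengths of the maximal alternating A/T runs of the sequence.
--     runs = []
--     cur = 0
--     prev = None
--     for ch in sequence:
--         if ch == 'A' or ch == 'T':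
--             if cur > 0 and ch != prev:
--                 cur += 1
--             else:
--                 runs.append(cur)
--                 cur = 1
--         else:
--             runs.append(cur)
--             cur = 0
--         prev = ch
--     runs.append(cur)
--     # Stage 2: a maximal alternating run of length r contains r // 2 disjoint AT/TA steps.
--     return sum(r // 2 for r in runs)
-- ===== Notes on version B (the rewrite author's own statement) =====
-- stated objective: alternative
-- what changed: B replaces A's greedy pair-counting state machine by a staged run-length algorithm: it first computes the lengths of the maximal alternating A/T runs, then sums the closed form r // 2 over those run lengths.
import Mathlib
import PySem

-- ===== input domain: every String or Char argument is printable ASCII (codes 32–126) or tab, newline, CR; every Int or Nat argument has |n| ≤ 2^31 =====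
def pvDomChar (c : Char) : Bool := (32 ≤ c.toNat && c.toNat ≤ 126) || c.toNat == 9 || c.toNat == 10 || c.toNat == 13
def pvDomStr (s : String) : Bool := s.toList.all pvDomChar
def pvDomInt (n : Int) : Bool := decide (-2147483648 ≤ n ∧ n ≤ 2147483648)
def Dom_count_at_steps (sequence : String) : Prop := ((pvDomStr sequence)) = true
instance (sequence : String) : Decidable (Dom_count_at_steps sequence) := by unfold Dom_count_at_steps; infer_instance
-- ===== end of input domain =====

-- B replaces A's greedy pair-counting state machine by a staged run-length algorithm
-- (collect the lengths of the maximal alternating A/T runs, then sum r // 2); alternative, same cost.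

-- ===== PORT A =====
-- A carries prev as a Python string ('' or one char); ported as Option Char (none = '').
def count_at_steps_go (l : List Char) (prev : Option Char) (count : Int) : Int :=
  match l with
  | [] => count
  | s :: rest =>
    if s = 'A' ∧ prev = some 'T' then count_at_steps_go rest none (count + 1)
    else if s = 'T' ∧ prev = some 'A' then count_at_steps_go rest none (count + 1)
    else count_at_steps_go rest (some s) count

def count_at_steps (sequence : String) : Int :=
  count_at_steps_go sequence.toList none 0

-- ===== PORT B =====
-- Stage 1 of Source B: the for loop collecting the lengths of maximal alternating A/T runs
-- (state: runs list, current run length, previous character; None ported as none).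
def count_at_steps_alt_runs (l : List Char) (runs : List Int) (cur : Int) (prev : Option Char) : List Int :=
  match l with
  | [] => runs ++ [cur]
  | ch :: rest =>
    if ch = 'A' ∨ ch = 'T' then
      if 0 < cur ∧ some ch ≠ prev then count_at_steps_alt_runs rest runs (cur + 1) (some ch)
      else count_at_steps_alt_runs rest (runs ++ [cur]) 1 (some ch)
    else count_at_steps_alt_runs rest (runs ++ [cur]) 0 (some ch)

-- Stage 2 of Source B: sum(r // 2 for r in runs).
def count_at_steps_alt (sequence : String) : Int :=
  ((count_at_steps_alt_runs sequence.toList [] 0 none).map (fun r => PySem.Int.floordiv r 2)).sum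

-- ===== PRECONDITION & SPEC =====
def Spec_count_at_steps (sequence : String) (out : Int) : Prop := out = count_at_steps_alt sequence
instance (sequence : String) (out : Int) : Decidable (Spec_count_at_steps sequence out) := by unfold Spec_count_at_steps; infer_instance

-- ===== CLAIM (what is proved, stated in full; the proofs are below) =====
def Claim_equal_count_at_steps : Prop := ∀ (sequence : String), Dom_count_at_steps sequence → Spec_count_at_steps sequence (count_at_steps sequence)

-- ===== LEMMAS AND PROOFS =====

-- B's sum over the run list, starting from current state (cur, prev), empty accumulator.
def pvF (l : List Char) (cur : Int) (prev : Option Char) : Int :=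
  ((count_at_steps_alt_runs l [] cur prev).map (fun r => PySem.Int.floordiv r 2)).sum

theorem pvRuns_acc (l : List Char) : ∀ (runs : List Int) (cur : Int) (prev : Option Char),
    count_at_steps_alt_runs l runs cur prev = runs ++ count_at_steps_alt_runs l [] cur prev := by
  induction l with
  | nil => intro runs cur prev; simp [count_at_steps_alt_runs]
  | cons ch rest ih =>
    intro runs cur prev
    simp only [count_at_steps_alt_runs]
    split_ifs with h1 h2
    · exact ih runs (cur + 1) (some ch)
    · simp only [List.nil_append]; rw [ih (runs ++ [cur]) 1 (some ch), ih [cur] 1 (some ch)]; simp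
    · simp only [List.nil_append]; rw [ih (runs ++ [cur]) 0 (some ch), ih [cur] 0 (some ch)]; simp

-- Unfolding equations for pvF.
theorem pvF_nil (cur : Int) (prev : Option Char) :
    pvF [] cur prev = PySem.Int.floordiv cur 2 := by
  simp [pvF, count_at_steps_alt_runs]

theorem pvF_cons (ch : Char) (rest : List Char) (cur : Int) (prev : Option Char) :
    pvF (ch :: rest) cur prev =
      if ch = 'A' ∨ ch = 'T' then
        if 0 < cur ∧ some ch ≠ prev then pvF rest (cur + 1) (some ch)
        else PySem.Int.floordiv cur 2 + pvF rest 1 (some ch)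
      else PySem.Int.floordiv cur 2 + pvF rest 0 (some ch) := by
  simp only [pvF, count_at_steps_alt_runs]
  split_ifs with h1 h2
  · rfl
  · simp only [List.nil_append]; rw [pvRuns_acc rest [cur] 1 (some ch)]; simp
  · simp only [List.nil_append]; rw [pvRuns_acc rest [cur] 0 (some ch)]; simp

-- The main invariant: A's loop from state (prevA, c) computes c plus all remaining pairs,
-- i.e. pvF minus the cur // 2 pairs of the current run that A has already counted.
-- Link between A's prev and B's (cur, prev):
-- even cur → prevA is not 'A'/'T'; odd cur → prevA = prevB = some p with p ∈ {A, T}.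
theorem pvMain (l : List Char) : ∀ (cur : Int) (prevB prevA : Option Char) (c : Int),
    0 ≤ cur →
    ((cur % 2 = 0 → prevA ≠ some 'A' ∧ prevA ≠ some 'T') ∧
     (cur % 2 ≠ 0 → ∃ p, prevA = some p ∧ prevB = some p ∧ (p = 'A' ∨ p = 'T'))) →
    count_at_steps_go l prevA c = c + pvF l cur prevB - PySem.Int.floordiv cur 2 := by
  have hfd : ∀ x : Int, PySem.Int.floordiv x 2 = x / 2 :=
    fun x => PySem.Int.floordiv_eq_ediv_of_pos (by norm_num)
  induction l with
  | nil =>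
    intro cur prevB prevA c _ _
    simp [count_at_steps_go, pvF_nil]
  | cons ch rest ih =>
    intro cur prevB prevA c hcur hinv
    rw [pvF_cons]
    by_cases hAT : ch = 'A' ∨ ch = 'T'
    · rw [if_pos hAT]
      rcases Int.emod_two_eq_zero_or_one cur with heven | hodd
      · -- even current run length: A's prev is not 'A'/'T', no pair fires
        obtain ⟨hna, hnt⟩ := hinv.1 heven
        have step : count_at_steps_go (ch :: rest) prevA c = count_at_steps_go rest (some ch) c := by
          simp only [count_at_steps_go]
          rw [if_neg (fun h => hnt h.2), if_neg (fun h => hna h.2)]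
        rw [step]
        by_cases hb : 0 < cur ∧ some ch ≠ prevB
        · rw [if_pos hb]
          rw [ih (cur + 1) (some ch) (some ch) c (by omega)
            ⟨fun h => by omega, fun _ => ⟨ch, rfl, rfl, hAT⟩⟩]
          simp only [hfd]; omega
        · rw [if_neg hb]
          rw [ih 1 (some ch) (some ch) c (by omega)
            ⟨fun h => by omega, fun _ => ⟨ch, rfl, rfl, hAT⟩⟩]
          simp only [hfd]; omega
      · -- odd current run length: A's prev is the run's last char p
        obtain ⟨p, hA, hB, hp⟩ := hinv.2 (by omega)
        by_cases hne : ch = p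
        · -- same char: both close the run without a pair
          have step : count_at_steps_go (ch :: rest) prevA c = count_at_steps_go rest (some ch) c := by
            simp only [count_at_steps_go, hA]
            rw [if_neg, if_neg]
            · rintro ⟨h1, h2⟩; rw [Option.some.injEq] at h2; rw [h2] at hne; rw [h1] at hne
              exact absurd hne (by decide)
            · rintro ⟨h1, h2⟩; rw [Option.some.injEq] at h2; rw [h2] at hne; rw [h1] at hne
              exact absurd hne (by decide)
          rw [step, if_neg (by rw [hB, hne]; simp)]
          rw [ih 1 (some ch) (some ch) c (by omega)
            ⟨fun h => by omega, fun _ => ⟨ch, rfl, rfl, hAT⟩⟩]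
          simp only [hfd]; omega
        · -- different A/T chars: A counts a pair, B extends the run
          have hpair : (ch = 'A' ∧ p = 'T') ∨ (ch = 'T' ∧ p = 'A') := by
            rcases hAT with h | h <;> rcases hp with h' | h' <;>
              first | (exact absurd (h.trans h'.symm) hne) | simp [h, h']
          have step : count_at_steps_go (ch :: rest) prevA c = count_at_steps_go rest none (c + 1) := by
            simp only [count_at_steps_go, hA]
            rcases hpair with ⟨h1, h2⟩ | ⟨h1, h2⟩
            · rw [if_pos ⟨h1, by rw [h2]⟩]
            · rw [if_neg (by rintro ⟨ha, _⟩; rw [h1] at ha; exact absurd ha (by decide)),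
                 if_pos ⟨h1, by rw [h2]⟩]
          rw [step, if_pos ⟨by omega, by rw [hB]; simpa using hne⟩]
          rw [ih (cur + 1) (some ch) none (c + 1) (by omega)
            ⟨fun _ => ⟨by simp, by simp⟩, fun h => by omega⟩]
          simp only [hfd]; omega
    · -- ch is not 'A'/'T': A's branches cannot fire, B closes the run
      rw [if_neg hAT]
      have step : count_at_steps_go (ch :: rest) prevA c = count_at_steps_go rest (some ch) c := by
        simp only [count_at_steps_go]
        rw [if_neg (fun h => hAT (Or.inl h.1)), if_neg (fun h => hAT (Or.inr h.1))]
      rw [step]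
      rw [ih 0 (some ch) (some ch) c le_rfl
        ⟨fun _ => ⟨by simpa using fun h => hAT (Or.inl h), by simpa using fun h => hAT (Or.inr h)⟩,
         fun h => absurd rfl h⟩]
      simp only [hfd]; omega

-- ===== VERDICT (by name: the statement is the Claim_ definition above) =====
theorem count_at_steps_spec : Claim_equal_count_at_steps := by
  intro sequence _
  unfold Spec_count_at_steps count_at_steps count_at_steps_alt
  have := pvMain sequence.toList 0 none none 0 le_rfl
    ⟨fun _ => by simp, fun h => absurd rfl h⟩
  simpa [pvF, PySem.Int.floordiv] using this
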